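-- pv_equiv track=rewrite | github.com/a-gavriel/Python-Games | Clases/Clases-Ejecicios/c11.py | prod_escalar_aux
-- ===== SOURCE A (Python) =====
-- def prod_escalar_aux (e,v,contador):
--   if (contador == len(v)):
--     return v
--   else:
--     elemento = v[contador]
--     producto = elemento*e
--     v[contador] = producto
--     return prod_escalar_aux (e,v, contador + 1)
-- ===== SOURCE B (Python) =====
-- def prod_escalar_aux(e, v, contador):
--     while contador != len(v):
--         v[contador] = v[contador] * e
--         contador += 1
--     return v
-- ===== Notes on version B (the rewrite author's own statement) =====
-- stated objective: simpler
-- what changed: Replaces the tail recursion (one Python call frame per element, hitting the recursion limit on long vectors) by a plain in-place while loop over the same counter.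
import Mathlib
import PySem

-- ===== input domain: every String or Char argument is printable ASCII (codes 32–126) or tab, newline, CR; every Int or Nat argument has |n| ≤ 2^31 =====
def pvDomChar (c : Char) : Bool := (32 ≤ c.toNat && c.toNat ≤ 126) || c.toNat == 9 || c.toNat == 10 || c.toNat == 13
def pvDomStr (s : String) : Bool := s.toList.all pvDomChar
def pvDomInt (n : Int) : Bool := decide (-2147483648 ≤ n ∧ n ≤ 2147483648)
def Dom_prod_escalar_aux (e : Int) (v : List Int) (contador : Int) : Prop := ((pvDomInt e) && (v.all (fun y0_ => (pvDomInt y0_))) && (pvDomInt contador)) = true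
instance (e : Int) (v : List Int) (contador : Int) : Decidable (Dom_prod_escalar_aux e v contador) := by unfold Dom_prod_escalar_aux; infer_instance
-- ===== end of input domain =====

-- B replaces A's tail recursion by a plain in-place while loop (O(1) stack instead of one
-- Python frame per element); A mutates v in place — the equivalence proved is about the
-- return value (B performs the same mutation in Python).

-- ===== PORT A =====
-- literal port of A's recursion; the `none` branches are Python's IndexError (excluded by Pre_)
def prod_escalar_aux (e : Int) (v : List Int) (contador : Int) : List Int :=
  if contador = (v.length : Int) then v
  else
    match _h : PySem.List.pyGet? v contador with
    | none => []  -- IndexError on v[contador]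
    | some elemento =>
      let producto := elemento * e
      prod_escalar_aux e (PySem.List.pySetD v contador producto) (contador + 1)
termination_by ((v.length : Int) - contador).toNat
decreasing_by
  have hin : PySem.Raise.InRange v.length contador := by
    by_contra hn
    rw [← PySem.List.pyGet?_eq_none_iff (xs := v) (i := contador)] at hn
    simp [hn] at _h
  have hlt : contador < (v.length : Int) := hin.2
  have hlen := PySem.List.length_pySetD v contador (elemento * e)
  omega

-- ===== PORT B =====
-- port of B's while loop: the loop state (v, contador) is iterated until contador = len(v)
def pvWhileLoop_prod_escalar (e : Int) (v : List Int) (c : Int) : List Int :=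
    if c ≠ (v.length : Int) then
      match _h : PySem.List.pySet? v c (PySem.List.pyGetD v c 0 * e) with
      | some v' => pvWhileLoop_prod_escalar e v' (c + 1)
      | none => v  -- IndexError in the loop body (excluded by Pre_)
    else v
termination_by ((v.length : Int) - c).toNat
decreasing_by
  have hin : PySem.Raise.InRange v.length c := by
    by_contra hn
    rw [← PySem.List.pySet?_eq_none_iff (xs := v) (i := c)
        (v := PySem.List.pyGetD v c 0 * e)] at hn
    simp [hn] at _h
  have hlt : c < (v.length : Int) := hin.2
  have hv' : v' = PySem.List.pySetD v c (PySem.List.pyGetD v c 0 * e) := by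
    simp [PySem.List.pySetD, _h]
  have hlen := PySem.List.length_pySetD v c (PySem.List.pyGetD v c 0 * e)
  simp only [hv']
  omega

def prod_escalar_aux_alt (e : Int) (v : List Int) (contador : Int) : List Int :=
  pvWhileLoop_prod_escalar e v contador

-- ===== PRECONDITION & SPEC =====
-- Pre_ is exactly where Python A returns: for contador outside [-len(v), len(v)] the read
-- v[contador] raises IndexError (B's loop raises identically there).
def Pre_prod_escalar_aux (e : Int) (v : List Int) (contador : Int) : Prop :=
  -(v.length : Int) ≤ contador ∧ contador ≤ (v.length : Int)
instance (e : Int) (v : List Int) (contador : Int) : Decidable (Pre_prod_escalar_aux e v contador) := by unfold Pre_prod_escalar_aux; infer_instance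

def pvWitness_prod_escalar_aux : Int × List Int × Int := (3, [1, 2, 4], 0)

def Spec_prod_escalar_aux (e : Int) (v : List Int) (contador : Int) (out : List Int) : Prop := out = prod_escalar_aux_alt e v contador
instance (e : Int) (v : List Int) (contador : Int) (out : List Int) : Decidable (Spec_prod_escalar_aux e v contador out) := by unfold Spec_prod_escalar_aux; infer_instance

-- ===== CLAIM (what is proved, stated in full; the proofs are below) =====
def Claim_equal_prod_escalar_aux : Prop := ∀ (e : Int) (v : List Int) (contador : Int), Dom_prod_escalar_aux e v contador → Pre_prod_escalar_aux e v contador → Spec_prod_escalar_aux e v contador (prod_escalar_aux e v contador)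

-- ===== LEMMAS AND PROOFS =====

-- the two computations take the same step and shrink the same measure
lemma prod_escalar_agree (n : Nat) :
    ∀ (e : Int) (v : List Int) (c : Int),
      ((v.length : Int) - c).toNat = n →
      -(v.length : Int) ≤ c → c ≤ (v.length : Int) →
      prod_escalar_aux e v c = pvWhileLoop_prod_escalar e v c := by
  induction n with
  | zero =>
    intro e v c hn hlo hhi
    have hc : c = (v.length : Int) := by omega
    rw [prod_escalar_aux.eq_def, pvWhileLoop_prod_escalar.eq_def]
    simp [hc]
  | succ k ih =>
    intro e v c hn hlo hhi
    have hc : c ≠ (v.length : Int) := by omega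
    have hlt : c < (v.length : Int) := by omega
    have hin : PySem.Raise.InRange v.length c := ⟨hlo, hlt⟩
    obtain ⟨x, hx⟩ : ∃ x, PySem.List.pyGet? v c = some x := by
      cases hget : PySem.List.pyGet? v c with
      | none => exact absurd (((PySem.List.pyGet?_eq_none_iff v c).mp hget)) (by simpa using hin)
      | some x => exact ⟨x, rfl⟩
    have hxD : PySem.List.pyGetD v c 0 = x := by
      simp [PySem.List.pyGetD, hx]
    obtain ⟨w, hw⟩ : ∃ w, PySem.List.pySet? v c (x * e) = some w := by
      cases hset : PySem.List.pySet? v c (x * e) with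
      | none => exact absurd (((PySem.List.pySet?_eq_none_iff v c (x * e)).mp hset)) (by simpa using hin)
      | some w => exact ⟨w, rfl⟩
    have hwD : w = PySem.List.pySetD v c (x * e) := by
      simp [PySem.List.pySetD, hw]
    have hwlen : w.length = v.length := by
      rw [hwD]; exact PySem.List.length_pySetD v c (x * e)
    rw [prod_escalar_aux.eq_def, pvWhileLoop_prod_escalar.eq_def, if_neg hc, if_pos hc]
    split
    · next heq =>
      rw [hx] at heq
      exact absurd heq (by simp)
    · next elemento heq =>
      rw [hx] at heq
      injection heq with heq
      subst heq
      split
      · next v' hset =>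
        rw [hxD, hw] at hset
        injection hset with hset
        show prod_escalar_aux e (PySem.List.pySetD v c (x * e)) (c + 1) =
          pvWhileLoop_prod_escalar e v' (c + 1)
        rw [← hwD, ← hset]
        exact ih e w (c + 1) (by omega) (by omega) (by omega)
      · next hset =>
        rw [hxD, hw] at hset
        exact absurd hset (by simp)

-- ===== VERDICT (by name: the statement is the Claim_ definition above) =====
theorem prod_escalar_aux_spec : Claim_equal_prod_escalar_aux := by
  intro e v c _hdom hpre
  exact prod_escalar_agree ((v.length : Int) - c).toNat e v c rfl hpre.1 hpre.2
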